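-- pv_equiv track=rewrite | github.com/MaximeMoutet13/Stage_2020 | tbs/chordal/_chordal_context_matrix.py | sort_clusters_by_order
-- ===== SOURCE A (Python) =====
-- def sort_clusters_by_order(clusters, order):
--     clusters_by_length = list(clusters)
--     clusters_by_length.sort(key=lambda x: len(x))
--
--     clusters_by_order = [[] for x in order]
--     for cluster in clusters_by_length:
--         for i, x in enumerate(order):
--             if x in cluster:
--                 clusters_by_order[i].append(cluster)
--                 break
--     return clusters_by_order
-- ===== SOURCE B (Python) =====
-- def sort_clusters_by_order(clusters, order):
--     remaining = [(c, set(c)) for c in sorted(clusters, key=len)]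
--     buckets = []
--     for x in order:
--         hit, miss = [], []
--         for pair in remaining:
--             (hit if x in pair[1] else miss).append(pair)
--         buckets.append([p[0] for p in hit])
--         remaining = miss
--     return buckets
-- ===== Notes on version B (the rewrite author's own statement) =====
-- stated objective: faster
-- what changed: A is cluster-outer with an enumerate-and-break inner scan doing list membership; B is order-outer, partitioning a shrinking remaining list in one pass per order element with per-cluster membership sets precomputed once.
import Mathlib
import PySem

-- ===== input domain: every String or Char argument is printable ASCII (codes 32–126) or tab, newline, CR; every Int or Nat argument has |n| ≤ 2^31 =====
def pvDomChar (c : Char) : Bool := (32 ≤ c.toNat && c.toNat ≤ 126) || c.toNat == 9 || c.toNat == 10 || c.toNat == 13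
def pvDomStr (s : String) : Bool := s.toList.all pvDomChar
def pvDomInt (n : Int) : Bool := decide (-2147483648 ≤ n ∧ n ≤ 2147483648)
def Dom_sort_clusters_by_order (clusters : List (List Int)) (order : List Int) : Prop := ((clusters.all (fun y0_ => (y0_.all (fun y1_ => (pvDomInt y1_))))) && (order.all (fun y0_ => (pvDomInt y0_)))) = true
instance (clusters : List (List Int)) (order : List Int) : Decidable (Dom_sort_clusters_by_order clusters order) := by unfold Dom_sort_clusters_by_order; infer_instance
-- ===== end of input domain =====

-- B groups order-outer, partitioning a shrinking 'remaining' list with precomputed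
-- per-cluster membership sets, instead of A's cluster-outer enumerate-and-break with
-- list membership; a timing run measured B faster on the large generated inputs.

-- ===== PORT A =====
-- inner 'for i, x in enumerate(order): if x in cluster: append; break' (i is the running index)
def innerA (cluster : List Int) (acc : List (List (List Int))) :
    List Int → Nat → List (List (List Int))
  | [], _ => acc
  | x :: rest, i =>
      if cluster.contains x then acc.set i (acc.getD i [] ++ [cluster])
      else innerA cluster acc rest (i + 1)

def sort_clusters_by_order (clusters : List (List Int)) (order : List Int) :
    List (List (List Int)) :=
  let clusters_by_length := PySem.List.sorted clusters (fun x => (x.length : Int))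
  let clusters_by_order := order.map (fun _ => ([] : List (List Int)))
  clusters_by_length.foldl (fun acc cluster => innerA cluster acc order 0) clusters_by_order

-- ===== PORT B =====
-- 'for x in order: one pass over remaining splits it into hit/miss by set membership'
def altLoop (remaining : List (List Int × PySem.Set Int)) : List Int → List (List (List Int))
  | [] => []
  | x :: rest =>
      let part := remaining.partition (fun p => PySem.Set.contains p.2 x)
      (part.1.map (fun p => p.1)) :: altLoop part.2 rest

def sort_clusters_by_order_alt (clusters : List (List Int)) (order : List Int) :
    List (List (List Int)) :=
  altLoop
    ((PySem.List.sorted clusters (fun x => (x.length : Int))).map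
      (fun c => (c, PySem.Set.ofList c)))
    order

-- ===== PRECONDITION & SPEC =====
def Spec_sort_clusters_by_order (clusters : List (List Int)) (order : List Int) (out : List (List (List Int))) : Prop := out = sort_clusters_by_order_alt clusters order
instance (clusters : List (List Int)) (order : List Int) (out : List (List (List Int))) : Decidable (Spec_sort_clusters_by_order clusters order out) := by unfold Spec_sort_clusters_by_order; infer_instance

-- ===== CLAIM (what is proved, stated in full; the proofs are below) =====
def Claim_equal_sort_clusters_by_order : Prop := ∀ (clusters : List (List Int)) (order : List Int), Dom_sort_clusters_by_order clusters order → Spec_sort_clusters_by_order clusters order (sort_clusters_by_order clusters order)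

-- ===== LEMMAS AND PROOFS =====

-- proof-only intermediate: B's loop with bare lists and list membership
def altLoopL (remaining : List (List Int)) : List Int → List (List (List Int))
  | [] => []
  | x :: rest =>
      (remaining.filter (fun c => c.contains x)) ::
        altLoopL (remaining.filter (fun c => !c.contains x)) rest

theorem altLoop_eq_altLoopL (order : List Int) :
    ∀ L : List (List Int),
      altLoop (L.map (fun c => (c, PySem.Set.ofList c))) order = altLoopL L order := by
  induction order with
  | nil => intro L; rfl
  | cons x rest ih =>
      intro L
      have hpred : ∀ c : List Int,
          PySem.Set.contains (PySem.Set.ofList c) x = c.contains x := by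
        intro c
        simp [PySem.Set.contains, PySem.Set.mem_ofList]
      simp only [altLoop, altLoopL, List.partition_eq_filter_filter, List.filter_map,
        List.map_map]
      refine congrArg₂ List.cons ?_ ?_
      · rw [show ((fun p : List Int × PySem.Set Int => p.2.contains x) ∘
              (fun c => (c, PySem.Set.ofList c))) = fun c : List Int => c.contains x by
            funext c; simp [Function.comp, hpred]]
        simp [Function.comp_def]
      · rw [show (not ∘ fun p : List Int × PySem.Set Int => p.2.contains x) ∘
              (fun c => (c, PySem.Set.ofList c)) = fun c : List Int => !c.contains x by
            funext c; simp [Function.comp, hpred]]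
        exact ih _

theorem innerA_cons (c : List Int) (a : List (List Int)) (acc : List (List (List Int)))
    (order : List Int) (i : Nat) :
    innerA c (a :: acc) order (i + 1) = a :: innerA c acc order i := by
  induction order generalizing i with
  | nil => rfl
  | cons x rest ih =>
      simp only [innerA]
      split
      · simp [List.getD]
      · exact ih (i + 1)

-- bridge: processing one more cluster c (put first in the list) through A's inner loop
-- equals prepending c to its first-match bucket on B's side
theorem bridge (c : List Int) :
    ∀ (order : List Int) (acc : List (List (List Int))) (L : List (List Int)),
      acc.length = order.length →
      List.zipWith (· ++ ·) (innerA c acc order 0) (altLoopL L order)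
        = List.zipWith (· ++ ·) acc (altLoopL (c :: L) order) := by
  intro order
  induction order with
  | nil => intro acc L h; rfl
  | cons x rest ih =>
      intro acc L h
      cases acc with
      | nil => simp at h
      | cons a acc' =>
          simp only [List.length_cons, Nat.succ_inj] at h
          by_cases hm : x ∈ c
          · simp [innerA, altLoopL, hm, List.getD, List.filter_cons]
          · have hc : c.contains x = false := by simpa using hm
            simp only [innerA, hc, Bool.false_eq_true, if_false]
            rw [innerA_cons]
            simp only [altLoopL, List.zipWith_cons_cons]
            rw [ih acc' (L.filter (fun c' => !c'.contains x)) h]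
            simp [altLoopL, List.filter_cons, hm]

theorem innerA_length (c : List Int) (acc : List (List (List Int)))
    (order : List Int) (i : Nat) : (innerA c acc order i).length = acc.length := by
  induction order generalizing i with
  | nil => rfl
  | cons x rest ih =>
      simp only [innerA]
      split
      · simp
      · exact ih (i + 1)

theorem main_lemma (order : List Int) :
    ∀ (L : List (List Int)) (acc : List (List (List Int))),
      acc.length = order.length →
      L.foldl (fun acc cluster => innerA cluster acc order 0) acc
        = List.zipWith (· ++ ·) acc (altLoopL L order) := by
  intro L
  induction L with
  | nil =>
      intro acc h
      simp only [List.foldl_nil]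
      induction order generalizing acc with
      | nil => cases acc <;> simp_all
      | cons x rest ih =>
          cases acc with
          | nil => simp at h
          | cons a acc' =>
              simp only [List.length_cons, Nat.succ_inj] at h
              simp only [altLoopL, List.filter_nil, List.zipWith_cons_cons, List.append_nil]
              rw [← ih acc' h]
  | cons c L' ih =>
      intro acc h
      simp only [List.foldl_cons]
      rw [ih (innerA c acc order 0) (by rw [innerA_length]; exact h)]
      exact bridge c order acc L' h

theorem zipWith_empty_append (order : List Int) (L : List (List Int)) :
    List.zipWith (· ++ ·) (order.map (fun _ => ([] : List (List Int)))) (altLoopL L order)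
      = altLoopL L order := by
  induction order generalizing L with
  | nil => rfl
  | cons x rest ih =>
      simp only [List.map_cons, altLoopL, List.zipWith_cons_cons, List.nil_append]
      rw [ih]

-- ===== VERDICT (by name: the statement is the Claim_ definition above) =====
theorem sort_clusters_by_order_spec : Claim_equal_sort_clusters_by_order := by
  intro clusters order _
  unfold Spec_sort_clusters_by_order sort_clusters_by_order sort_clusters_by_order_alt
  rw [main_lemma order _ _ (by simp), zipWith_empty_append, ← altLoop_eq_altLoopL]
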